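-- pv_equiv track=rewrite | github.com/ErillLab/CAG-MD | scripts/find_pattern.py | find_palindromic_sequences
-- ===== SOURCE A (Python) =====
-- def find_palindromic_sequences(sequence, min_length=3, max_length=None):
--     """
--     Find palindromic sequences within the given sequence.
--
--     This function searches for palindromic sequences within the provided sequence.
--     A palindromic sequence is a sequence that reads the same forward and backward.
--
--     Parameters:
--         sequence (str): The input sequence in which to search for palindromic sequences.
--         min_length (int): The minimum length of palindromic sequences to search for (default is 3).
--         max_length (int): The maximum length of palindromic sequences to search for.
--             If None, the maximum length is set to half the length of the input sequence.
--
--     Returns: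
--         list: A list of tuples containing palindromic sequences found in the input sequence.
--             Each tuple contains the start position, palindromic fragment, end position, and palindromic fragment.
--     """
--
--     if max_length is None:
--         max_length = len(sequence) // 2
--
--     palindromic_sequences = []
--
--     for length in range(min_length, max_length + 1):
--         for i in range(len(sequence) - length + 1):
--             fragment = sequence[i:i+length]
--             if fragment == fragment[::-1]:
--                 for j in range(i + length, len(sequence) - length + 1):
--                     if sequence[j:j+length] == fragment:
--                         palindromic_sequences.append((i, fragment, j, fragment))
--
--     return palindromic_sequences
-- ===== SOURCE B (Python) =====
-- import bisect
--
-- def find_palindromic_sequences(sequence, min_length=3, max_length=None):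
--     if max_length is None:
--         max_length = len(sequence) // 2
--     n = len(sequence)
--     results = []
--     for length in range(min_length, max_length + 1):
--         # index every substring of this length by its start positions (one pass)
--         positions = {}
--         for j in range(n - length + 1):
--             positions.setdefault(sequence[j:j+length], []).append(j)
--         for i in range(n - length + 1):
--             fragment = sequence[i:i+length]
--             if fragment == fragment[::-1]:
--                 occ = positions[fragment]
--                 for j in occ[bisect.bisect_left(occ, i + length):]:
--                     results.append((i, fragment, j, fragment))
--     return results
-- ===== Notes on version B (the rewrite author's own statement) =====
-- stated objective: alternative
-- what changed: Per substring length, B builds a dict mapping each substring to its sorted start positions in one pass and emits repeats via bisect_left, removing A's innermost rescan of the whole sequence for every palindromic fragment.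
import Mathlib
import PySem

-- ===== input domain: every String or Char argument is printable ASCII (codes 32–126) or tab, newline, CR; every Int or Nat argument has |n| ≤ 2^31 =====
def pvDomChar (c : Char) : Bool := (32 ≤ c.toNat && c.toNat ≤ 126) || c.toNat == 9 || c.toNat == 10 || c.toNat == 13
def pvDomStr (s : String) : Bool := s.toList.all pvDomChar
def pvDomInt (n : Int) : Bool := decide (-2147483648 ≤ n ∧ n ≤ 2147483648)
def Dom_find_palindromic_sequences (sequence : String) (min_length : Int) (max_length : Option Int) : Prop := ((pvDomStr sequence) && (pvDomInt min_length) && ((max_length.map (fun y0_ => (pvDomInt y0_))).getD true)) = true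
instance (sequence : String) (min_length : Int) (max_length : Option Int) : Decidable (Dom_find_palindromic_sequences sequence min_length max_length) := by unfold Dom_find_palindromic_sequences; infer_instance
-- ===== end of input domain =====

-- B replaces A's innermost rescan of the whole string by a per-length position index
-- (dict of start positions per substring, bisect for the non-overlap bound); objective: alternative.

-- ===== PORT A =====
-- literal transliteration of A: three nested loops, innermost rescans the string.
-- fragment[::-1] is ported as List.reverse (PySem.List.slice?_none_none_neg_one).
def find_palindromic_sequences (sequence : String) (min_length : Int) (max_length : Option Int) : List (Int × String × Int × String) :=
  let s := sequence.toList
  let max_length : Int :=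
    match max_length with
    | none => PySem.Int.floordiv ((s.length : Int)) 2
    | some m => m
  (PySem.List.pyRange min_length (max_length + 1)).foldl (fun acc length =>
    (PySem.List.pyRange 0 ((s.length : Int) - length + 1)).foldl (fun acc i =>
      let fragment := PySem.List.slice s (some i) (some (i + length))
      if fragment == fragment.reverse then
        (PySem.List.pyRange (i + length) ((s.length : Int) - length + 1)).foldl (fun acc j =>
          if PySem.List.slice s (some j) (some (j + length)) == fragment then
            acc ++ [(i, String.ofList fragment, j, String.ofList fragment)]
          else acc) acc
      else acc) acc) []

-- ===== PORT B =====
-- per length: one pass builds positions[fragment] (dict.setdefault(..,[]).append),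
-- then each palindromic start i emits occ[bisect_left(occ, i+length):].
-- positions[fragment] is ported as getD _ []: the key is always present, since i ranges
-- over exactly the indexing pass's range.
def find_palindromic_sequences_alt (sequence : String) (min_length : Int) (max_length : Option Int) : List (Int × String × Int × String) :=
  let s := sequence.toList
  let n : Int := (s.length : Int)
  let max_length : Int :=
    match max_length with
    | none => PySem.Int.floordiv n 2
    | some m => m
  (PySem.List.pyRange min_length (max_length + 1)).foldl (fun results length =>
    let positions : PySem.Dict (List Char) (List Int) :=
      (PySem.List.pyRange 0 (n - length + 1)).foldl
        (fun d j => d.modify (PySem.List.slice s (some j) (some (j + length))) [] (fun l => l ++ [j]))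
        PySem.Dict.empty
    (PySem.List.pyRange 0 (n - length + 1)).foldl (fun results i =>
      let fragment := PySem.List.slice s (some i) (some (i + length))
      if fragment == fragment.reverse then
        let occ := positions.getD fragment []
        results ++ (occ.drop (PySem.List.bisectLeft occ (i + length))).map
          (fun j => (i, String.ofList fragment, j, String.ofList fragment))
      else results) results) []

-- ===== PRECONDITION & SPEC =====
-- Pre_ excludes non-positive-length searches (negative min_length with a non-empty length
-- range): substring lengths are positive by the function's purpose, and there A's Python
-- slice arithmetic pairs empty/garbled fragments with negative positions.
def Pre_find_palindromic_sequences (sequence : String) (min_length : Int) (max_length : Option Int) : Prop :=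
  0 ≤ min_length ∨
    (match max_length with
     | none => PySem.Int.floordiv ((sequence.toList.length : Int)) 2
     | some m => m) < min_length
instance (sequence : String) (min_length : Int) (max_length : Option Int) : Decidable (Pre_find_palindromic_sequences sequence min_length max_length) := by unfold Pre_find_palindromic_sequences; infer_instance

def pvWitness_find_palindromic_sequences : String × Int × Option Int := ("abaXaba", 3, none)

def Spec_find_palindromic_sequences (sequence : String) (min_length : Int) (max_length : Option Int) (out : List (Int × String × Int × String)) : Prop := out = find_palindromic_sequences_alt sequence min_length max_length
instance (sequence : String) (min_length : Int) (max_length : Option Int) (out : List (Int × String × Int × String)) : Decidable (Spec_find_palindromic_sequences sequence min_length max_length out) := by unfold Spec_find_palindromic_sequences; infer_instance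

-- ===== CLAIM (what is proved, stated in full; the proofs are below) =====
def Claim_equal_find_palindromic_sequences : Prop := ∀ (sequence : String) (min_length : Int) (max_length : Option Int), Dom_find_palindromic_sequences sequence min_length max_length → Pre_find_palindromic_sequences sequence min_length max_length → Spec_find_palindromic_sequences sequence min_length max_length (find_palindromic_sequences sequence min_length max_length)

-- ===== LEMMAS AND PROOFS =====

-- the dict built by modify-append maps each fragment to the (ordered) list of its start positions
theorem pv_getD_build (key : Int → List Char) (js : List Int) :
    ∀ (d : PySem.Dict (List Char) (List Int)) (f : List Char),
      (js.foldl (fun d j => d.modify (key j) [] (fun l => l ++ [j])) d).getD f []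
        = d.getD f [] ++ js.filter (fun j => key j == f) := by
  induction js with
  | nil => intro d f; simp
  | cons j js ih =>
    intro d f
    simp only [List.foldl_cons, List.filter_cons]
    rw [ih, PySem.Dict.getD_modify]
    by_cases h : f = key j
    · simp [h, List.append_assoc]
    · have h' : (key j == f) = false := by simp; exact fun e => h e.symm
      simp [h, h']

-- on a sorted list, dropping at bisect_left x keeps exactly the elements ≥ x
theorem pv_drop_bisectLeft_eq_filter (xs : List Int) (x : Int) (h : xs.Pairwise (· ≤ ·)) :
    xs.drop (PySem.List.bisectLeft xs x) = xs.filter (fun y => decide (x ≤ y)) := by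
  obtain ⟨hk, hlt, hge⟩ := PySem.List.bisectLeft_spec xs x h
  set k := PySem.List.bisectLeft xs x with hkdef
  have h1 : (xs.take k).filter (fun y => decide (x ≤ y)) = [] := by
    rw [List.filter_eq_nil_iff]
    intro a ha
    rw [List.mem_iff_getElem] at ha
    obtain ⟨i, hi, rfl⟩ := ha
    have hil : i < xs.length := by
      have := hi; simp only [List.length_take] at this; omega
    have hik : i < k := by
      have := hi; simp only [List.length_take] at this; omega
    have := hlt i hil hik
    simp only [List.getElem_take]
    simpa using not_le_of_gt this
  have h2 : (xs.drop k).filter (fun y => decide (x ≤ y)) = xs.drop k := by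
    rw [List.filter_eq_self]
    intro a ha
    rw [List.mem_iff_getElem] at ha
    obtain ⟨i, hi, rfl⟩ := ha
    have hil : k + i < xs.length := by
      have := hi; simp only [List.length_drop] at this; omega
    have := hge (k + i) hil (Nat.le_add_right _ _)
    simp only [List.getElem_drop]
    simpa using this
  conv_rhs => rw [← List.take_append_drop k xs, List.filter_append, h1, h2, List.nil_append]

-- filtering "≥ x" out of the positions of [0, m) is scanning [x, m)
theorem pv_filter_ge_pyRange (P : Int → Bool) (m x : Int) (hx : 0 ≤ x) :
    ((PySem.List.pyRange 0 m).filter P).filter (fun y => decide (x ≤ y))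
      = (PySem.List.pyRange x m).filter P := by
  by_cases hxm : x ≤ m
  · rw [PySem.List.pyRange_one_append 0 x m hx hxm, List.filter_append, List.filter_append]
    have h1 : ((PySem.List.pyRange 0 x).filter P).filter (fun y => decide (x ≤ y)) = [] := by
      rw [List.filter_eq_nil_iff]
      intro a ha
      have := PySem.List.mem_pyRange_one.mp (List.mem_of_mem_filter ha)
      simp only [decide_eq_true_eq]
      omega
    have h2 : ((PySem.List.pyRange x m).filter P).filter (fun y => decide (x ≤ y))
        = (PySem.List.pyRange x m).filter P := by
      rw [List.filter_eq_self]
      intro a ha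
      have := PySem.List.mem_pyRange_one.mp (List.mem_of_mem_filter ha)
      simp only [decide_eq_true_eq]
      omega
    rw [h1, h2, List.nil_append]
  · rw [PySem.List.pyRange_one_eq_nil (show m ≤ x by omega)]
    simp only [List.filter_nil]
    rw [List.filter_eq_nil_iff]
    intro a ha
    have := PySem.List.mem_pyRange_one.mp (List.mem_of_mem_filter ha)
    simp only [decide_eq_true_eq]
    omega

-- per-length bodies agree (length ≥ 0)
theorem pv_body_eq (s : List Char) (L : Int) (hL : 0 ≤ L)
    (acc : List (Int × String × Int × String)) :
    (PySem.List.pyRange 0 ((s.length : Int) - L + 1)).foldl (fun acc i =>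
        let fragment := PySem.List.slice s (some i) (some (i + L))
        if fragment == fragment.reverse then
          (PySem.List.pyRange (i + L) ((s.length : Int) - L + 1)).foldl (fun acc j =>
            if PySem.List.slice s (some j) (some (j + L)) == fragment then
              acc ++ [(i, String.ofList fragment, j, String.ofList fragment)]
            else acc) acc
        else acc) acc
      =
    (PySem.List.pyRange 0 ((s.length : Int) - L + 1)).foldl (fun results i =>
        let fragment := PySem.List.slice s (some i) (some (i + L))
        if fragment == fragment.reverse then
          let occ := ((PySem.List.pyRange 0 ((s.length : Int) - L + 1)).foldl
            (fun d j => d.modify (PySem.List.slice s (some j) (some (j + L))) [] (fun l => l ++ [j]))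
            PySem.Dict.empty).getD fragment []
          results ++ (occ.drop (PySem.List.bisectLeft occ (i + L))).map
            (fun j => (i, String.ofList fragment, j, String.ofList fragment))
        else results) acc := by
  apply PySem.List.foldl_congr_mem
  intro a i hi
  have hi0 : 0 ≤ i := (PySem.List.mem_pyRange_one.mp hi).1
  simp only
  by_cases hpal : (PySem.List.slice s (some i) (some (i + L))
      == (PySem.List.slice s (some i) (some (i + L))).reverse) = true
  · rw [if_pos hpal, if_pos hpal, PySem.List.foldl_append_if]
    congr 1
    rw [pv_getD_build (fun j => PySem.List.slice s (some j) (some (j + L)))]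
    have hempty : (PySem.Dict.empty : PySem.Dict (List Char) (List Int)).getD
        (PySem.List.slice s (some i) (some (i + L))) [] = [] := rfl
    rw [hempty, List.nil_append]
    have hsorted : ((PySem.List.pyRange 0 ((s.length : Int) - L + 1)).filter
        (fun j => PySem.List.slice s (some j) (some (j + L))
          == PySem.List.slice s (some i) (some (i + L)))).Pairwise (· ≤ ·) :=
      ((PySem.List.pairwise_lt_pyRange_one 0 ((s.length : Int) - L + 1)).filter _).imp le_of_lt
    rw [pv_drop_bisectLeft_eq_filter _ _ hsorted,
      pv_filter_ge_pyRange _ _ _ (show (0:Int) ≤ i + L by omega)]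
  · rw [if_neg hpal, if_neg hpal]

-- the whole loops agree whenever every iterated length is ≥ 0 (or no length is iterated)
theorem pv_master (s : List Char) (lo ef : Int) (h : 0 ≤ lo ∨ ef < lo) :
    (PySem.List.pyRange lo (ef + 1)).foldl (fun acc length =>
      (PySem.List.pyRange 0 ((s.length : Int) - length + 1)).foldl (fun acc i =>
        let fragment := PySem.List.slice s (some i) (some (i + length))
        if fragment == fragment.reverse then
          (PySem.List.pyRange (i + length) ((s.length : Int) - length + 1)).foldl (fun acc j =>
            if PySem.List.slice s (some j) (some (j + length)) == fragment then
              acc ++ [(i, String.ofList fragment, j, String.ofList fragment)]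
            else acc) acc
        else acc) acc) []
      =
    (PySem.List.pyRange lo (ef + 1)).foldl (fun results length =>
      let positions : PySem.Dict (List Char) (List Int) :=
        (PySem.List.pyRange 0 ((s.length : Int) - length + 1)).foldl
          (fun d j => d.modify (PySem.List.slice s (some j) (some (j + length))) [] (fun l => l ++ [j]))
          PySem.Dict.empty
      (PySem.List.pyRange 0 ((s.length : Int) - length + 1)).foldl (fun results i =>
        let fragment := PySem.List.slice s (some i) (some (i + length))
        if fragment == fragment.reverse then
          let occ := positions.getD fragment []
          results ++ (occ.drop (PySem.List.bisectLeft occ (i + length))).map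
            (fun j => (i, String.ofList fragment, j, String.ofList fragment))
        else results) results) [] := by
  rcases h with h | h
  · apply PySem.List.foldl_congr_mem
    intro acc L hL
    exact pv_body_eq s L (le_trans h (PySem.List.mem_pyRange_one.mp hL).1) acc
  · rw [PySem.List.pyRange_one_eq_nil (show ef + 1 ≤ lo by omega)]
    rfl

-- ===== VERDICT (by name: the statement is the Claim_ definition above) =====
theorem find_palindromic_sequences_spec : Claim_equal_find_palindromic_sequences := by
  intro sequence min_length max_length hdom hpre
  unfold Spec_find_palindromic_sequences
  simp only [find_palindromic_sequences, find_palindromic_sequences_alt]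
  unfold Pre_find_palindromic_sequences at hpre
  cases max_length with
  | none => exact pv_master sequence.toList min_length (PySem.Int.floordiv ((sequence.toList.length : Int)) 2) hpre
  | some m => exact pv_master sequence.toList min_length m hpre
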